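-- pv_equiv track=rewrite | github.com/ashbob999/Advent-of-Code | 2024/day15.py | get_jb
-- ===== SOURCE A (Python) =====
-- def in_blocks(p, blocks):
-- 	for b in blocks:
-- 		if b[1] == p[1]:
-- 			if p[0] == b[0] or p[0] == b[0]+1:
-- 				return True
--
-- 	return False
--
-- def get_block(p, blocks):
-- 	if p in blocks:
-- 		return p
--
-- 	for b in blocks:
-- 		if p[1] == b[1]:
-- 			if p[0] == b[0] or p[0] == b[0]+1:
-- 				return b
--
-- 	return None
--
-- def get_jb(p, dir, blocks, g):
-- 	jb = set()
--
-- 	if not in_blocks(p, blocks):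
-- 		return set()
--
-- 	assert dir[0] == 0
--
-- 	b = get_block(p, blocks)
-- 	jb.add(b)
--
-- 	x, y = b
-- 	y += dir[1]
--
-- 	x1 = x
-- 	x2 = x+1
--
-- 	b1 = get_block((x1, y), blocks)
-- 	b2 = get_block((x2, y), blocks)
--
-- 	if b1 == b2:
-- 		if b1 is not None:
-- 			jb |= get_jb(b1, dir, blocks, g)
-- 	else:
-- 		if b1 is not None:
-- 			jb |= get_jb(b1, dir, blocks, g)
-- 		if b2 is not None:
-- 			jb |= get_jb(b2, dir, blocks, g)
--
--
-- 	return jb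
-- ===== SOURCE B (Python) =====
-- # B: iterative worklist (explicit DFS stack) instead of A's naive recursion; same helpers.
-- # Return value only is compared; like A, B returns a set of block tuples.
--
-- def in_blocks(p, blocks):
-- 	for b in blocks:
-- 		if b[1] == p[1]:
-- 			if p[0] == b[0] or p[0] == b[0]+1:
-- 				return True
-- 	return False
--
-- def get_block(p, blocks):
-- 	if p in blocks:
-- 		return p
-- 	for b in blocks:
-- 		if p[1] == b[1]:
-- 			if p[0] == b[0] or p[0] == b[0]+1:
-- 				return b
-- 	return None
--
-- def get_jb(p, dir, blocks, g):
-- 	if not in_blocks(p, blocks):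
-- 		return set()
-- 	assert dir[0] == 0
-- 	jb = set()
-- 	stack = [get_block(p, blocks)]
-- 	while stack:
-- 		b = stack.pop()
-- 		jb.add(b)
-- 		x, y0 = b
-- 		y = y0 + dir[1]
-- 		b1 = get_block((x, y), blocks)
-- 		b2 = get_block((x+1, y), blocks)
-- 		if b2 is not None and b2 != b1:
-- 			stack.append(b2)
-- 		if b1 is not None:
-- 			stack.append(b1)
-- 	return jb
-- ===== Notes on version B (the rewrite author's own statement) =====
-- stated objective: alternative
-- what changed: A's naive self-recursion over the cluster of touching boxes is replaced by an iterative worklist: a single while loop pops a block from an explicit stack, adds it to the result set and pushes its (distinct, non-None) upward neighbours, instead of recursing and unioning the recursive result sets.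
-- outside the precondition, e.g. on get_jb((1, 1), (0, 1), [(1, 1), (5, 5, 5)], []): A returns {(1, 1)}, B returns {(1, 1)}
import Mathlib
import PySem

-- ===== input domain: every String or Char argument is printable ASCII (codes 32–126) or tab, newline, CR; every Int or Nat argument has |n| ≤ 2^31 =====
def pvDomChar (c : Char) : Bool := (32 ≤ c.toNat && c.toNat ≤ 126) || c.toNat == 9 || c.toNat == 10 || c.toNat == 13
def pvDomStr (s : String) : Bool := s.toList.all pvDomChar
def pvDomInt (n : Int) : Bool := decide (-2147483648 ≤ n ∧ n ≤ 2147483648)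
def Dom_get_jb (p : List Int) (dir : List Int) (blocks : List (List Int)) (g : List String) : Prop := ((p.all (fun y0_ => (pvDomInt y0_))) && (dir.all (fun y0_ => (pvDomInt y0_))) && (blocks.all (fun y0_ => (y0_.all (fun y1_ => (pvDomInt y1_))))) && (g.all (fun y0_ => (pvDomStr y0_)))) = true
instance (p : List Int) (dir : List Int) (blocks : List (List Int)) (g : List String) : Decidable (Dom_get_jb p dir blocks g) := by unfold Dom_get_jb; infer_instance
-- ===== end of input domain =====

-- B replaces A's naive recursion over the box cluster by an iterative worklist (explicit DFS stack); same helpers, same return value.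

-- ===== PORT A =====
-- helper in_blocks: 'for b in blocks: if b[1]==p[1]: if p[0]==b[0] or p[0]==b[0]+1: return True; return False'
-- (indexing via pyGetD with default 0: Pre_get_jb guarantees every index Python reads is in range)
def in_blocks_port (p : List Int) (blocks : List (List Int)) : Bool :=
  match blocks with
  | [] => false
  | b :: rest =>
      if (PySem.List.pyGetD b 1 0 == PySem.List.pyGetD p 1 0) &&
         ((PySem.List.pyGetD p 0 0 == PySem.List.pyGetD b 0 0) ||
          (PySem.List.pyGetD p 0 0 == PySem.List.pyGetD b 0 0 + 1)) then
        true
      else in_blocks_port p rest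

-- helper get_block, second phase: the 'for b in blocks' search loop
def get_block_loop (p : List Int) (blocks : List (List Int)) : Option (List Int) :=
  match blocks with
  | [] => none
  | b :: rest =>
      if (PySem.List.pyGetD p 1 0 == PySem.List.pyGetD b 1 0) &&
         ((PySem.List.pyGetD p 0 0 == PySem.List.pyGetD b 0 0) ||
          (PySem.List.pyGetD p 0 0 == PySem.List.pyGetD b 0 0 + 1)) then
        some b
      else get_block_loop p rest

-- helper get_block: 'if p in blocks: return p' then the search loop ('return None' = none)
def get_block_port (p : List Int) (blocks : List (List Int)) : Option (List Int) :=
  if blocks.contains p then some p else get_block_loop p blocks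

-- A's recursive get_jb. Python recursion totalized with a fuel argument (a totalization guard only:
-- under Pre_get_jb the y-coordinate advances strictly each call, so blocks.length + 1 fuel is never exhausted;
-- the 'assert dir[0] == 0' and the 'x, y = b' unpack cannot fail under Pre_get_jb).
def get_jbF (fuel : Nat) (p : List Int) (dir : List Int) (blocks : List (List Int)) (g : List String) : PySem.Set (List Int) :=
  match fuel with
  | 0 => PySem.Set.empty
  | fuel + 1 =>
    if !(in_blocks_port p blocks) then PySem.Set.empty
    else
      match get_block_port p blocks with
      | none => PySem.Set.empty  -- unreachable: in_blocks true gives get_block ≠ None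
      | some b =>
        let jb := PySem.Set.add PySem.Set.empty b   -- jb = set(); jb.add(b)
        let x := PySem.List.pyGetD b 0 0            -- x, y = b
        let y := PySem.List.pyGetD b 1 0 + PySem.List.pyGetD dir 1 0   -- y += dir[1]
        let b1 := get_block_port [x, y] blocks
        let b2 := get_block_port [x + 1, y] blocks
        if b1 == b2 then
          match b1 with
          | some c => PySem.Set.update jb (get_jbF fuel c dir blocks g)   -- jb |= get_jb(b1,…)
          | none => jb
        else
          let jb1 := match b1 with
            | some c => PySem.Set.update jb (get_jbF fuel c dir blocks g)
            | none => jb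
          match b2 with
          | some c => PySem.Set.update jb1 (get_jbF fuel c dir blocks g)
          | none => jb1

def get_jb (p : List Int) (dir : List Int) (blocks : List (List Int)) (g : List String) : List (List Int) :=
  get_jbF (blocks.length + 1) p dir blocks g

-- ===== PORT B =====
-- B's while loop over the worklist. Python 'stack.pop()' takes the list END; the stack is modeled with its
-- top at the list HEAD (append = cons, pop = head), which is the same stack discipline. Fuel totalizes the
-- while loop only (under Pre_get_jb at most 2^(depth) ≤ 3^(blocks.length+1) pops happen, so it is never exhausted).
def jb_loop (fuel : Nat) (dir : List Int) (blocks : List (List Int)) (stack : List (List Int)) (jb : PySem.Set (List Int)) : PySem.Set (List Int) :=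
  match fuel, stack with
  | _, [] => jb
  | 0, _ :: _ => jb    -- fuel guard, never reached under Pre_get_jb
  | fuel + 1, b :: rest =>
      let jb' := PySem.Set.add jb b                -- jb.add(b)
      let x := PySem.List.pyGetD b 0 0             -- x, y0 = b
      let y := PySem.List.pyGetD b 1 0 + PySem.List.pyGetD dir 1 0    -- y = y0 + dir[1]
      let b1 := get_block_port [x, y] blocks
      let b2 := get_block_port [x + 1, y] blocks
      let st1 := match b2 with                     -- if b2 is not None and b2 != b1: stack.append(b2)
        | some c => if b1 == some c then rest else c :: rest
        | none => rest
      let st2 := match b1 with                     -- if b1 is not None: stack.append(b1)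
        | some c => c :: st1
        | none => st1
      jb_loop fuel dir blocks st2 jb'

def get_jb_alt (p : List Int) (dir : List Int) (blocks : List (List Int)) (g : List String) : List (List Int) :=
  if !(in_blocks_port p blocks) then PySem.Set.empty
  else
    match get_block_port p blocks with
    | none => PySem.Set.empty  -- unreachable: in_blocks true gives get_block ≠ None
    | some b => jb_loop (3 ^ (blocks.length + 1)) dir blocks [b] PySem.Set.empty

-- ===== PRECONDITION & SPEC =====
-- Pre_ excludes exactly the inputs where Python A raises: an index/unpack error while scanning or unpacking
-- short blocks or a short p/dir, the AssertionError when dir[0] ≠ 0, and the unbounded recursion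
-- (RecursionError) when dir[1] = 0 while p touches a block. It also requires, when p touches a block, that
-- ALL blocks have length exactly 2 (not only the ones the recursion actually unpacks): a mild narrowing —
-- A still returns when an unreachable block is longer; see the cited example.
def Pre_get_jb (p : List Int) (dir : List Int) (blocks : List (List Int)) (g : List String) : Prop :=
  (blocks = [] ∨ 2 ≤ p.length) ∧
  (∀ b ∈ blocks, 2 ≤ b.length) ∧
  ((∃ b ∈ blocks, b.getD 1 0 = p.getD 1 0 ∧ (p.getD 0 0 = b.getD 0 0 ∨ p.getD 0 0 = b.getD 0 0 + 1)) →
    ((∀ b ∈ blocks, b.length = 2) ∧ 2 ≤ dir.length ∧ dir.getD 0 0 = 0 ∧ dir.getD 1 0 ≠ 0))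

instance (p : List Int) (dir : List Int) (blocks : List (List Int)) (g : List String) : Decidable (Pre_get_jb p dir blocks g) := by
  unfold Pre_get_jb; infer_instance

def pvWitness_get_jb : List Int × List Int × List (List Int) × List String :=
  ([1, 1], [0, 1], [[1, 1], [1, 2]], [])

def Spec_get_jb (p : List Int) (dir : List Int) (blocks : List (List Int)) (g : List String) (out : List (List Int)) : Prop := out = get_jb_alt p dir blocks g
instance (p : List Int) (dir : List Int) (blocks : List (List Int)) (g : List String) (out : List (List Int)) : Decidable (Spec_get_jb p dir blocks g out) := by unfold Spec_get_jb; infer_instance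

-- ===== CLAIM (what is proved, stated in full; the proofs are below) =====
def Claim_equal_get_jb : Prop := ∀ (p : List Int) (dir : List Int) (blocks : List (List Int)) (g : List String), Dom_get_jb p dir blocks g → Pre_get_jb p dir blocks g → Spec_get_jb p dir blocks g (get_jb p dir blocks g)

-- ===== LEMMAS AND PROOFS =====

-- y-coordinate of a block
def yOf (l : List Int) : Int := l.getD 1 0

-- number of blocks strictly ahead of q in the push direction d: the termination rank
def rnk (d : Int) (blocks : List (List Int)) (q : List Int) : Nat :=
  (blocks.filter (fun c => decide (0 < (yOf c - yOf q) * d))).length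

-- A's recursion at its canonical (just sufficient) fuel
def ares (dir : List Int) (blocks : List (List Int)) (g : List String) (q : List Int) : PySem.Set (List Int) :=
  get_jbF (rnk (PySem.List.pyGetD dir 1 0) blocks q + 1) q dir blocks g

-- one unfolding step of A's recursion, with children at canonical fuel
def stepA (dir : List Int) (blocks : List (List Int)) (g : List String) (b : List Int) : PySem.Set (List Int) :=
  let jb := PySem.Set.add PySem.Set.empty b
  let x := PySem.List.pyGetD b 0 0
  let y := PySem.List.pyGetD b 1 0 + PySem.List.pyGetD dir 1 0
  let b1 := get_block_port [x, y] blocks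
  let b2 := get_block_port [x + 1, y] blocks
  if b1 == b2 then
    match b1 with
    | some c => PySem.Set.update jb (ares dir blocks g c)
    | none => jb
  else
    let jb1 := match b1 with
      | some c => PySem.Set.update jb (ares dir blocks g c)
      | none => jb
    match b2 with
    | some c => PySem.Set.update jb1 (ares dir blocks g c)
    | none => jb1

lemma in_blocks_iff (p : List Int) (blocks : List (List Int)) :
    in_blocks_port p blocks = true ↔
      ∃ b ∈ blocks, PySem.List.pyGetD b 1 0 = PySem.List.pyGetD p 1 0 ∧
        (PySem.List.pyGetD p 0 0 = PySem.List.pyGetD b 0 0 ∨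
         PySem.List.pyGetD p 0 0 = PySem.List.pyGetD b 0 0 + 1) := by
  induction blocks with
  | nil => simp [in_blocks_port]
  | cons b rest ih =>
      by_cases h : (PySem.List.pyGetD b 1 0 = PySem.List.pyGetD p 1 0 ∧
        (PySem.List.pyGetD p 0 0 = PySem.List.pyGetD b 0 0 ∨
         PySem.List.pyGetD p 0 0 = PySem.List.pyGetD b 0 0 + 1)) <;>
        simp [in_blocks_port, ih, h]

lemma get_block_loop_none {p : List Int} {blocks : List (List Int)}
    (h : get_block_loop p blocks = none) : in_blocks_port p blocks = false := by
  induction blocks with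
  | nil => simp [in_blocks_port]
  | cons b rest ih =>
      simp only [get_block_loop] at h
      split at h
      · simp at h
      · rename_i hcond
        simp only [in_blocks_port]
        rw [if_neg, ih h]
        intro hc
        apply hcond
        simp only [Bool.and_eq_true, Bool.or_eq_true, beq_iff_eq] at hc ⊢
        omega

lemma get_block_loop_mem {p c : List Int} {blocks : List (List Int)}
    (h : get_block_loop p blocks = some c) : c ∈ blocks := by
  induction blocks with
  | nil => simp [get_block_loop] at h
  | cons b rest ih =>
      simp only [get_block_loop] at h
      split at h
      · simp at h; simp [h]
      · exact List.mem_cons_of_mem _ (ih h)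

lemma get_block_mem {p c : List Int} {blocks : List (List Int)}
    (h : get_block_port p blocks = some c) : c ∈ blocks := by
  unfold get_block_port at h
  split at h
  · rename_i hc
    simp at h
    subst h
    exact List.mem_of_elem_eq_true hc
  · exact get_block_loop_mem h

lemma get_block_isSome {p : List Int} {blocks : List (List Int)}
    (h : in_blocks_port p blocks = true) : ∃ c, get_block_port p blocks = some c := by
  unfold get_block_port
  split
  · exact ⟨p, rfl⟩
  · cases hl : get_block_loop p blocks with
    | some c => exact ⟨c, rfl⟩
    | none => rw [get_block_loop_none hl] at h; cases h

lemma get_block_self {c : List Int} {blocks : List (List Int)} (h : c ∈ blocks) :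
    get_block_port c blocks = some c := by
  simp [get_block_port]
  exact fun h' => absurd h h'

lemma in_blocks_self {c : List Int} {blocks : List (List Int)} (h : c ∈ blocks) :
    in_blocks_port c blocks = true := by
  rw [in_blocks_iff]
  exact ⟨c, h, rfl, Or.inl rfl⟩

lemma get_block_loop_y {q c : List Int} {blocks : List (List Int)}
    (h : get_block_loop q blocks = some c) : yOf c = PySem.List.pyGetD q 1 0 := by
  induction blocks with
  | nil => simp [get_block_loop] at h
  | cons b rest ih =>
      simp only [get_block_loop] at h
      split at h
      · rename_i hcond
        simp only [Option.some.injEq] at h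
        simp only [Bool.and_eq_true, beq_iff_eq] at hcond
        rw [show yOf c = PySem.List.pyGetD c 1 0 from (PySem.List.pyGetD_ofNat' c 1 0).symm, ← h]
        exact hcond.1.symm
      · exact ih h

lemma get_block_y {q c : List Int} {blocks : List (List Int)}
    (h : get_block_port q blocks = some c) : yOf c = PySem.List.pyGetD q 1 0 := by
  unfold get_block_port at h
  split at h
  · simp only [Option.some.injEq] at h
    rw [← h]
    exact (PySem.List.pyGetD_ofNat' q 1 0).symm
  · exact get_block_loop_y h

-- strict subset of filtered lists: generic length lemma
lemma filter_length_le {α : Type} (l : List α) (P Q : α → Bool)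
    (hpq : ∀ x ∈ l, P x = true → Q x = true) :
    (l.filter P).length ≤ (l.filter Q).length := by
  induction l with
  | nil => simp
  | cons a t ih =>
      have ht := ih (fun x hx => hpq x (List.mem_cons_of_mem _ hx))
      by_cases hPa : P a = true
      · have hQa := hpq a List.mem_cons_self hPa
        simp only [List.filter_cons, hPa, hQa, if_true, List.length_cons]
        omega
      · by_cases hQa : Q a = true <;> simp only [List.filter_cons, hPa, hQa, if_true,
          Bool.false_eq_true, if_false, List.length_cons] <;> omega

lemma filter_length_lt {α : Type} (l : List α) (P Q : α → Bool)
    (hpq : ∀ x ∈ l, P x = true → Q x = true) (x0 : α) (hx0 : x0 ∈ l)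
    (hQ : Q x0 = true) (hP : P x0 = false) :
    (l.filter P).length < (l.filter Q).length := by
  induction l with
  | nil => simp at hx0
  | cons a t ih =>
      have hpq' : ∀ x ∈ t, P x = true → Q x = true :=
        fun x hx => hpq x (List.mem_cons_of_mem _ hx)
      rcases List.mem_cons.mp hx0 with rfl | hx0t
      · have hle := filter_length_le t P Q hpq'
        simp only [List.filter_cons, hP, hQ, if_true, Bool.false_eq_true, if_false,
          List.length_cons]
        omega
      · have hlt := ih hpq' hx0t
        by_cases hPa : P a = true
        · have hQa := hpq a List.mem_cons_self hPa
          simp only [List.filter_cons, hPa, hQa, if_true, List.length_cons]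
          omega
        · by_cases hQa : Q a = true <;> simp only [List.filter_cons, hPa, hQa, if_true,
            Bool.false_eq_true, if_false, List.length_cons] <;> omega

lemma rnk_child_lt {d : Int} {blocks : List (List Int)} {b c : List Int}
    (hd : d ≠ 0) (hc : c ∈ blocks) (hy : yOf c = yOf b + d) :
    rnk d blocks c < rnk d blocks b := by
  unfold rnk
  refine filter_length_lt _ _ _ ?_ c hc ?_ ?_
  · intro x _ hx
    rw [decide_eq_true_iff] at hx ⊢
    have key : (yOf x - yOf b) * d = (yOf x - yOf c) * d + d * d := by rw [hy]; ring
    rw [key]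
    have := mul_self_pos.mpr hd
    omega
  · rw [decide_eq_true_iff, hy]
    have key : (yOf b + d - yOf b) * d = d * d := by ring
    rw [key]
    exact mul_self_pos.mpr hd
  · rw [decide_eq_false_iff_not]
    simp

lemma rnk_le {d : Int} {blocks : List (List Int)} (q : List Int) :
    rnk d blocks q ≤ blocks.length :=
  List.length_filter_le _ _

-- one unfolding of A's recursion, children at fuel f
def stepF (f : Nat) (dir : List Int) (blocks : List (List Int)) (g : List String) (b : List Int) : PySem.Set (List Int) :=
  let jb := PySem.Set.add PySem.Set.empty b
  let x := PySem.List.pyGetD b 0 0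
  let y := PySem.List.pyGetD b 1 0 + PySem.List.pyGetD dir 1 0
  let b1 := get_block_port [x, y] blocks
  let b2 := get_block_port [x + 1, y] blocks
  if b1 == b2 then
    match b1 with
    | some c => PySem.Set.update jb (get_jbF f c dir blocks g)
    | none => jb
  else
    let jb1 := match b1 with
      | some c => PySem.Set.update jb (get_jbF f c dir blocks g)
      | none => jb
    match b2 with
    | some c => PySem.Set.update jb1 (get_jbF f c dir blocks g)
    | none => jb1

lemma get_jbF_succ {q b : List Int} {blocks : List (List Int)} (f : Nat) (dir : List Int) (g : List String)
    (hib : in_blocks_port q blocks = true) (hgb : get_block_port q blocks = some b) :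
    get_jbF (f + 1) q dir blocks g = stepF f dir blocks g b := by
  simp only [get_jbF, stepF, hib, hgb, Bool.not_true, Bool.false_eq_true, if_false]

lemma get_jbF_none {q : List Int} {blocks : List (List Int)} (f : Nat) (dir : List Int) (g : List String)
    (hib : in_blocks_port q blocks = false) :
    get_jbF (f + 1) q dir blocks g = PySem.Set.empty := by
  simp only [get_jbF, hib, Bool.not_false, if_true]

lemma child_rnk_lt {dir : List Int} {blocks : List (List Int)} {q b c : List Int} {w : Int}
    (hd : PySem.List.pyGetD dir 1 0 ≠ 0)
    (hgb : get_block_port q blocks = some b)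
    (hc : get_block_port [w, PySem.List.pyGetD b 1 0 + PySem.List.pyGetD dir 1 0] blocks = some c) :
    rnk (PySem.List.pyGetD dir 1 0) blocks c < rnk (PySem.List.pyGetD dir 1 0) blocks q := by
  have hyb : yOf b = PySem.List.pyGetD q 1 0 := get_block_y hgb
  have hyc : yOf c = PySem.List.pyGetD b 1 0 + PySem.List.pyGetD dir 1 0 := by
    rw [get_block_y hc, PySem.List.pyGetD_ofNat']
    rfl
  apply rnk_child_lt hd (get_block_mem hc)
  rw [hyc, show PySem.List.pyGetD b 1 0 = yOf b from PySem.List.pyGetD_ofNat' b 1 0, hyb,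
    show PySem.List.pyGetD q 1 0 = yOf q from PySem.List.pyGetD_ofNat' q 1 0]

-- fuel irrelevance for A's recursion, given enough fuel on both sides
lemma get_jbF_fuel {dir : List Int} {blocks : List (List Int)} {g : List String}
    (hd : PySem.List.pyGetD dir 1 0 ≠ 0) :
    ∀ (n : Nat) (q : List Int) (f1 f2 : Nat),
      rnk (PySem.List.pyGetD dir 1 0) blocks q ≤ n → n < f1 → n < f2 →
      get_jbF f1 q dir blocks g = get_jbF f2 q dir blocks g := by
  intro n
  induction n using Nat.strong_induction_on with
  | _ n ih =>
    intro q f1 f2 hr h1 h2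
    obtain ⟨f1', rfl⟩ : ∃ m, f1 = m + 1 := ⟨f1 - 1, by omega⟩
    obtain ⟨f2', rfl⟩ : ∃ m, f2 = m + 1 := ⟨f2 - 1, by omega⟩
    by_cases hib : in_blocks_port q blocks = true
    · obtain ⟨b, hgb⟩ := get_block_isSome hib
      rw [get_jbF_succ f1' dir g hib hgb, get_jbF_succ f2' dir g hib hgb]
      have step : ∀ c, get_block_port [PySem.List.pyGetD b 0 0,
            PySem.List.pyGetD b 1 0 + PySem.List.pyGetD dir 1 0] blocks = some c ∨
          get_block_port [PySem.List.pyGetD b 0 0 + 1,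
            PySem.List.pyGetD b 1 0 + PySem.List.pyGetD dir 1 0] blocks = some c →
          get_jbF f1' c dir blocks g = get_jbF f2' c dir blocks g := by
        intro c hc
        have hlt : rnk (PySem.List.pyGetD dir 1 0) blocks c <
            rnk (PySem.List.pyGetD dir 1 0) blocks q := by
          rcases hc with hc | hc
          · exact child_rnk_lt hd hgb hc
          · exact child_rnk_lt hd hgb hc
        exact ih (rnk (PySem.List.pyGetD dir 1 0) blocks c) (by omega) c f1' f2' le_rfl
          (by omega) (by omega)
      simp only [stepF]
      cases hb1 : get_block_port [PySem.List.pyGetD b 0 0,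
          PySem.List.pyGetD b 1 0 + PySem.List.pyGetD dir 1 0] blocks with
      | none =>
          cases hb2 : get_block_port [PySem.List.pyGetD b 0 0 + 1,
              PySem.List.pyGetD b 1 0 + PySem.List.pyGetD dir 1 0] blocks with
          | none => rfl
          | some c2 => simp only [step c2 (Or.inr hb2)]
      | some c1 =>
          cases hb2 : get_block_port [PySem.List.pyGetD b 0 0 + 1,
              PySem.List.pyGetD b 1 0 + PySem.List.pyGetD dir 1 0] blocks with
          | none => simp only [step c1 (Or.inl hb1)]
          | some c2 => simp only [step c1 (Or.inl hb1), step c2 (Or.inr hb2)]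
    · rw [Bool.not_eq_true] at hib
      rw [get_jbF_none f1' dir g hib, get_jbF_none f2' dir g hib]

lemma nodup_get_jbF : ∀ (f : Nat) (q dir : List Int) (blocks : List (List Int)) (g : List String),
    (get_jbF f q dir blocks g).Nodup := by
  intro f
  induction f with
  | zero => intro q dir blocks g; exact List.nodup_nil
  | succ f ih =>
      intro q dir blocks g
      by_cases hib : in_blocks_port q blocks = true
      · obtain ⟨b, hgb⟩ := get_block_isSome hib
        rw [get_jbF_succ f dir g hib hgb]
        have hbase : (PySem.Set.add PySem.Set.empty b).Nodup :=
          PySem.Set.nodup_add _ _ List.nodup_nil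
        simp only [stepF]
        cases get_block_port [PySem.List.pyGetD b 0 0,
            PySem.List.pyGetD b 1 0 + PySem.List.pyGetD dir 1 0] blocks with
        | none =>
            cases get_block_port [PySem.List.pyGetD b 0 0 + 1,
                PySem.List.pyGetD b 1 0 + PySem.List.pyGetD dir 1 0] blocks with
            | none => exact hbase
            | some c2 => exact PySem.Set.nodup_update _ _ hbase
        | some c1 =>
            cases get_block_port [PySem.List.pyGetD b 0 0 + 1,
                PySem.List.pyGetD b 1 0 + PySem.List.pyGetD dir 1 0] blocks with
            | none => split <;> exact PySem.Set.nodup_update _ _ hbase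
            | some c2 =>
                split
                · exact PySem.Set.nodup_update _ _ hbase
                · exact PySem.Set.nodup_update _ _ (PySem.Set.nodup_update _ _ hbase)
      · rw [Bool.not_eq_true] at hib
        rw [get_jbF_none f dir g hib]
        exact List.nodup_nil

-- canonical unfolding of A at any point q that touches a block
lemma ares_eq_stepA {dir : List Int} {blocks : List (List Int)} {g : List String}
    (hd : PySem.List.pyGetD dir 1 0 ≠ 0)
    {q b : List Int}
    (hib : in_blocks_port q blocks = true) (hgb : get_block_port q blocks = some b) :
    ares dir blocks g q = stepA dir blocks g b := by
  unfold ares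
  rw [get_jbF_succ (rnk (PySem.List.pyGetD dir 1 0) blocks q) dir g hib hgb]
  have step : ∀ c, get_block_port [PySem.List.pyGetD b 0 0,
        PySem.List.pyGetD b 1 0 + PySem.List.pyGetD dir 1 0] blocks = some c ∨
      get_block_port [PySem.List.pyGetD b 0 0 + 1,
        PySem.List.pyGetD b 1 0 + PySem.List.pyGetD dir 1 0] blocks = some c →
      get_jbF (rnk (PySem.List.pyGetD dir 1 0) blocks q) c dir blocks g = ares dir blocks g c := by
    intro c hc
    have hlt : rnk (PySem.List.pyGetD dir 1 0) blocks c <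
        rnk (PySem.List.pyGetD dir 1 0) blocks q := by
      rcases hc with hc | hc
      · exact child_rnk_lt hd hgb hc
      · exact child_rnk_lt hd hgb hc
    exact get_jbF_fuel hd (rnk (PySem.List.pyGetD dir 1 0) blocks c) c _ _ le_rfl hlt
      (Nat.lt_succ_self _)
  simp only [stepF, stepA]
  cases hb1 : get_block_port [PySem.List.pyGetD b 0 0,
      PySem.List.pyGetD b 1 0 + PySem.List.pyGetD dir 1 0] blocks with
  | none =>
      cases hb2 : get_block_port [PySem.List.pyGetD b 0 0 + 1,
          PySem.List.pyGetD b 1 0 + PySem.List.pyGetD dir 1 0] blocks with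
      | none => rfl
      | some c2 => simp only [step c2 (Or.inr hb2)]
  | some c1 =>
      cases hb2 : get_block_port [PySem.List.pyGetD b 0 0 + 1,
          PySem.List.pyGetD b 1 0 + PySem.List.pyGetD dir 1 0] blocks with
      | none => simp only [step c1 (Or.inl hb1)]
      | some c2 => simp only [step c1 (Or.inl hb1), step c2 (Or.inr hb2)]

-- Set algebra: update distributes over add and update
lemma update_add {α : Type} [BEq α] [LawfulBEq α] (a s : PySem.Set α) (x : α) :
    PySem.Set.update a (PySem.Set.add s x) = PySem.Set.add (PySem.Set.update a s) x := by
  by_cases hx : x ∈ s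
  · rw [PySem.Set.add_of_mem hx,
      PySem.Set.add_of_mem ((PySem.Set.mem_update a s x).mpr (Or.inr hx))]
  · rw [PySem.Set.add_of_not_mem hx, PySem.Set.update_append]
    rfl

lemma update_assoc {α : Type} [BEq α] [LawfulBEq α] (a s : PySem.Set α) (t : List α) :
    PySem.Set.update a (PySem.Set.update s t) = PySem.Set.update (PySem.Set.update a s) t := by
  induction t generalizing s with
  | nil => rfl
  | cons x t ih =>
      rw [PySem.Set.update_cons s x t, ih (PySem.Set.add s x), update_add a s x,
        ← PySem.Set.update_cons]

-- update by a one-step result: the two basic reshuffles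
lemma upd_single {jb : PySem.Set (List Int)} (c : List Int) :
    PySem.Set.update jb (PySem.Set.add PySem.Set.empty c) = PySem.Set.add jb c := by
  rw [update_add]; rfl

-- the worklist loop computes the fold of A's recursion over the stack
lemma jb_loop_eq {dir : List Int} {blocks : List (List Int)} {g : List String}
    (hd : PySem.List.pyGetD dir 1 0 ≠ 0) :
    ∀ (fuel : Nat) (stack : List (List Int)) (jb : PySem.Set (List Int)),
      (∀ c ∈ stack, c ∈ blocks) →
      (stack.map (fun c => 3 ^ (rnk (PySem.List.pyGetD dir 1 0) blocks c + 1))).sum ≤ fuel →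
      jb_loop fuel dir blocks stack jb =
        stack.foldl (fun acc c => PySem.Set.update acc (ares dir blocks g c)) jb := by
  intro fuel
  induction fuel with
  | zero =>
      intro stack jb hmem hsum
      cases stack with
      | nil => rfl
      | cons c rest =>
          exfalso
          simp only [List.map_cons, List.sum_cons] at hsum
          have : 0 < 3 ^ (rnk (PySem.List.pyGetD dir 1 0) blocks c + 1) :=
            pow_pos (by norm_num) _
          omega
  | succ fuel ih =>
      intro stack jb hmem hsum
      cases stack with
      | nil => rfl
      | cons c rest =>
        have hc : c ∈ blocks := hmem c List.mem_cons_self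
        have hmem' : ∀ x ∈ rest, x ∈ blocks := fun x hx => hmem x (List.mem_cons_of_mem _ hx)
        have hares : ares dir blocks g c = stepA dir blocks g c :=
          ares_eq_stepA hd (in_blocks_self hc) (get_block_self hc)
        simp only [List.map_cons, List.sum_cons] at hsum
        have h3 : (3:Nat) ^ (rnk (PySem.List.pyGetD dir 1 0) blocks c + 1) =
            3 * 3 ^ (rnk (PySem.List.pyGetD dir 1 0) blocks c) := by
          rw [pow_succ]; ring
        have hpos : 0 < 3 ^ rnk (PySem.List.pyGetD dir 1 0) blocks c := pow_pos (by norm_num) _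
        have hchild : ∀ {w : Int} {cx : List Int},
            get_block_port [w, PySem.List.pyGetD c 1 0 + PySem.List.pyGetD dir 1 0] blocks =
              some cx →
            3 ^ (rnk (PySem.List.pyGetD dir 1 0) blocks cx + 1) ≤
              3 ^ rnk (PySem.List.pyGetD dir 1 0) blocks c := by
          intro w cx hcx
          exact Nat.pow_le_pow_right (by norm_num) (child_rnk_lt hd (get_block_self hc) hcx)
        simp only [List.foldl_cons]
        rw [hares]
        simp only [jb_loop, stepA]
        cases hb1 : get_block_port [PySem.List.pyGetD c 0 0,
            PySem.List.pyGetD c 1 0 + PySem.List.pyGetD dir 1 0] blocks with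
        | none =>
            cases hb2 : get_block_port [PySem.List.pyGetD c 0 0 + 1,
                PySem.List.pyGetD c 1 0 + PySem.List.pyGetD dir 1 0] blocks with
            | none =>
                dsimp only
                rw [ite_self, upd_single, ih rest (PySem.Set.add jb c) hmem' (by omega)]
            | some c2 =>
                have hbeq : ((none : Option (List Int)) == some c2) = false := rfl
                dsimp only
                simp only [hbeq, Bool.false_eq_true, if_false]
                rw [update_assoc, upd_single,
                  ih (c2 :: rest) (PySem.Set.add jb c) (by
                    intro x hx
                    rcases List.mem_cons.mp hx with rfl | hx
                    · exact get_block_mem hb2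
                    · exact hmem' x hx)
                    (by
                      have := hchild hb2
                      simp only [List.map_cons, List.sum_cons]
                      omega)]
                simp only [List.foldl_cons]
        | some c1 =>
            cases hb2 : get_block_port [PySem.List.pyGetD c 0 0 + 1,
                PySem.List.pyGetD c 1 0 + PySem.List.pyGetD dir 1 0] blocks with
            | none =>
                have hbeq : (some c1 == (none : Option (List Int))) = false := rfl
                dsimp only
                simp only [hbeq, Bool.false_eq_true, if_false]
                rw [update_assoc, upd_single,
                  ih (c1 :: rest) (PySem.Set.add jb c) (by
                    intro x hx
                    rcases List.mem_cons.mp hx with rfl | hx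
                    · exact get_block_mem hb1
                    · exact hmem' x hx)
                    (by
                      have := hchild hb1
                      simp only [List.map_cons, List.sum_cons]
                      omega)]
                simp only [List.foldl_cons]
            | some c2 =>
                by_cases hcc : c1 = c2
                · have hbeq : (some c1 == some c2) = true := by subst hcc; simp
                  dsimp only
                  simp only [hbeq, if_true]
                  rw [update_assoc, upd_single,
                    ih (c1 :: rest) (PySem.Set.add jb c) (by
                      intro x hx
                      rcases List.mem_cons.mp hx with rfl | hx
                      · exact get_block_mem hb1
                      · exact hmem' x hx)
                      (by
                        have := hchild hb1
                        simp only [List.map_cons, List.sum_cons]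
                        omega)]
                  simp only [List.foldl_cons]
                · have hbeq : (some c1 == some c2) = false := by simp [hcc]
                  dsimp only
                  simp only [hbeq, Bool.false_eq_true, if_false]
                  rw [update_assoc, update_assoc, upd_single,
                    ih (c1 :: c2 :: rest) (PySem.Set.add jb c) (by
                      intro x hx
                      rcases List.mem_cons.mp hx with rfl | hx
                      · exact get_block_mem hb1
                      rcases List.mem_cons.mp hx with rfl | hx
                      · exact get_block_mem hb2
                      · exact hmem' x hx)
                      (by
                        have h1 := hchild hb1
                        have h2 := hchild hb2
                        simp only [List.map_cons, List.sum_cons]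
                        omega)]
                  simp only [List.foldl_cons]
-- ===== VERDICT (by name: the statement is the Claim_ definition above) =====
theorem get_jb_spec : Claim_equal_get_jb := by
  intro p dir blocks g hDom hPre
  unfold Spec_get_jb get_jb get_jb_alt
  by_cases hib : in_blocks_port p blocks = true
  · obtain ⟨b, hgb⟩ := get_block_isSome hib
    have hmem : b ∈ blocks := get_block_mem hgb
    have hov := hPre.2.2 (by
      obtain ⟨b', hb', h1, h2⟩ := (in_blocks_iff p blocks).mp hib
      simp only [PySem.List.pyGetD_ofNat'] at h1 h2
      exact ⟨b', hb', h1, h2⟩)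
    have hd : PySem.List.pyGetD dir 1 0 ≠ 0 := by
      rw [PySem.List.pyGetD_ofNat']
      exact hov.2.2.2
    have hA : get_jbF (blocks.length + 1) p dir blocks g = ares dir blocks g p :=
      get_jbF_fuel hd (rnk (PySem.List.pyGetD dir 1 0) blocks p) p _ _ le_rfl
        (by have := rnk_le (d := PySem.List.pyGetD dir 1 0) (blocks := blocks) p; omega)
        (Nat.lt_succ_self _)
    rw [hA]
    simp only [hib, Bool.not_true, Bool.false_eq_true, if_false, hgb]
    rw [jb_loop_eq hd _ [b] PySem.Set.empty
      (by
        intro x hx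
        rcases List.mem_cons.mp hx with rfl | hx
        · exact hmem
        · simp at hx)
      (by
        simp only [List.map_cons, List.map_nil, List.sum_cons, List.sum_nil]
        have h1 : rnk (PySem.List.pyGetD dir 1 0) blocks b ≤ blocks.length := rnk_le b
        have h2 := Nat.pow_le_pow_right (show 1 ≤ 3 by norm_num)
          (show rnk (PySem.List.pyGetD dir 1 0) blocks b + 1 ≤ blocks.length + 1 by omega)
        omega)]
    simp only [List.foldl_cons, List.foldl_nil]
    have hupd : PySem.Set.update PySem.Set.empty (ares dir blocks g b) = ares dir blocks g b := by
      rw [show (PySem.Set.empty : PySem.Set (List Int)) = [] from rfl, PySem.Set.update_nil_left]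
      exact PySem.Set.ofList_eq_self_of_nodup _ (nodup_get_jbF _ _ _ _ _)
    rw [hupd, ares_eq_stepA hd hib hgb,
      ← ares_eq_stepA hd (in_blocks_self hmem) (get_block_self hmem)]
  · rw [Bool.not_eq_true] at hib
    rw [get_jbF_none blocks.length dir g hib]
    simp only [hib, Bool.not_false, if_true]
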